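-- pv_equiv track=rewrite | github.com/stafa-san/bat-edge-monitor | edge/batdetect-service/src/storage.py | pick_class_folder
-- ===== SOURCE A (Python) =====
-- from typing import Iterable, List, Optional, Tuple
--
-- CLASS_PRIORITY_ORDER: Tuple[str, ...] = ("PESU", "LACI", "LABO", "MYSP", "EPFU_LANO")
--
-- def pick_class_folder(
--     tier: int,
--     rows_data: Iterable[Tuple[dict, Optional[dict]]],
-- ) -> Optional[str]:
--     """Choose the species subfolder for a tier-1 file.
--
--     When a single WAV contains multiple predicted classes we route it to
--     the rarest one present (per ``CLASS_PRIORITY_ORDER``) so Dr. Johnson's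
--     review workflow surfaces rare species first.
--
--     Returns ``None`` for tiers 2/3/4 (they share a flat directory).
--     """
--     if tier != 1:
--         return None
--
--     classes_present = {
--         pred["predicted_class"]
--         for _, pred in rows_data
--         if pred is not None
--     }
--     for cls in CLASS_PRIORITY_ORDER:
--         if cls in classes_present:
--             return cls
--     # Unknown class — shouldn't happen if the classifier is in its
--     # trained domain, but degrade gracefully rather than crash.
--     return None
-- ===== SOURCE B (Python) =====
-- from typing import Iterable, List, Optional, Tuple
--
-- CLASS_PRIORITY_ORDER: Tuple[str, ...] = ("PESU", "LACI", "LABO", "MYSP", "EPFU_LANO")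
--
-- def pick_class_folder(
--     tier: int,
--     rows_data: Iterable[Tuple[dict, Optional[dict]]],
-- ) -> Optional[str]:
--     if tier != 1:
--         return None
--     priority = {cls: i for i, cls in enumerate(CLASS_PRIORITY_ORDER)}
--     best = None
--     for _, pred in rows_data:
--         if pred is None:
--             continue
--         i = priority.get(pred["predicted_class"])
--         if i is not None and (best is None or i < best):
--             best = i
--     return CLASS_PRIORITY_ORDER[best] if best is not None else None
-- ===== Notes on version B (the rewrite author's own statement) =====
-- stated objective: simpler
-- what changed: Replaces the two-phase set-comprehension-then-priority-scan with a single pass over rows_data that tracks the minimum priority index via a precomputed class->index map, eliminating the separate scan over CLASS_PRIORITY_ORDER and the intermediate set.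
import Mathlib
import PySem

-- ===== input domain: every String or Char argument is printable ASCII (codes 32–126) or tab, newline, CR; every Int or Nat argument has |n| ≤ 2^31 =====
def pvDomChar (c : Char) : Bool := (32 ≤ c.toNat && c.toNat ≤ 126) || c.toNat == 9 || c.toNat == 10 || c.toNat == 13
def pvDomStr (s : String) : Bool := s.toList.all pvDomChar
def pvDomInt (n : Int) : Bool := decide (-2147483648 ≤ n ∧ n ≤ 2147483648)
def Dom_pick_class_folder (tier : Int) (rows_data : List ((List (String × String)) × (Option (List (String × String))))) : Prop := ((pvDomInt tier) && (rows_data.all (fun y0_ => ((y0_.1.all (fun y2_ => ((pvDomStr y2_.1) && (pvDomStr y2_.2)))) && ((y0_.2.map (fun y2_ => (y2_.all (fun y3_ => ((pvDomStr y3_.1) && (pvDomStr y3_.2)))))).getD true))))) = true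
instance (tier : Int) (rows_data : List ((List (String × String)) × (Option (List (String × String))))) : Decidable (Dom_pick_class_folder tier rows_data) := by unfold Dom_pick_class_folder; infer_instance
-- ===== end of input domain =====

-- B replaces A's two-phase "build set of classes, then scan the priority order" by a single pass
-- tracking the minimum priority index via a precomputed class->index map (objective: simpler decomposition).


-- ===== PORT A =====
def pvOrder : List String := ["PESU", "LACI", "LABO", "MYSP", "EPFU_LANO"]

-- pred["predicted_class"]; the KeyError case (missing key) is excluded by Pre_, so getD's default is never the value used.
def pvPredClass (pred : List (String × String)) : String :=
  (PySem.Dict.mk pred).getD "predicted_class" ""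

-- 'for cls in CLASS_PRIORITY_ORDER: if cls in classes_present: return cls' then 'return None'
def pvScan : List String → PySem.Set String → Option String
  | [], _ => none
  | c :: rest, s => if PySem.Set.contains s c then some c else pvScan rest s

def pick_class_folder (tier : Int) (rows_data : List ((List (String × String)) × (Option (List (String × String))))) : Option String :=
  if tier ≠ 1 then none
  else
    let classes_present : PySem.Set String :=
      rows_data.foldl (fun s r =>
        match r.2 with
        | none => s
        | some pred => PySem.Set.add s (pvPredClass pred)) PySem.Set.empty
    pvScan pvOrder classes_present

-- ===== PORT B =====
-- priority = {cls: i for i, cls in enumerate(CLASS_PRIORITY_ORDER)}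
def pvPrio : PySem.Dict String Int :=
  (PySem.List.enumerate pvOrder).foldl (fun d p => d.insert p.2 p.1) PySem.Dict.empty

def pick_class_folder_alt (tier : Int) (rows_data : List ((List (String × String)) × (Option (List (String × String))))) : Option String :=
  if tier ≠ 1 then none
  else
    let best : Option Int :=
      rows_data.foldl (fun b r =>
        match r.2 with
        | none => b
        | some pred =>
          match pvPrio.get? (pvPredClass pred) with
          | none => b
          | some i =>
            match b with
            | none => some i
            | some j => if i < j then some i else some j) none
    -- CLASS_PRIORITY_ORDER[best]: best is always a valid index, so pyGet? returns 'some cls'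
    match best with
    | none => none
    | some i => PySem.List.pyGet? pvOrder i

-- ===== PRECONDITION & SPEC =====
-- Pre_ excludes exactly the inputs where Python A raises KeyError: tier 1 with a non-None
-- prediction dict lacking the "predicted_class" key (Python B raises there too; for tier ≠ 1
-- both return before touching the dicts).
def Pre_pick_class_folder (tier : Int) (rows_data : List ((List (String × String)) × (Option (List (String × String))))) : Prop :=
  tier = 1 → ∀ r ∈ rows_data, ∀ pred, r.2 = some pred → "predicted_class" ∈ pred.map Prod.fst
instance (tier : Int) (rows_data : List ((List (String × String)) × (Option (List (String × String))))) : Decidable (Pre_pick_class_folder tier rows_data) := by unfold Pre_pick_class_folder; infer_instance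

def pvWitness_pick_class_folder : Int × (List ((List (String × String)) × (Option (List (String × String))))) :=
  (1, [([], some [("predicted_class", "LACI")]), ([], none), ([], some [("predicted_class", "PESU")])])

def Spec_pick_class_folder (tier : Int) (rows_data : List ((List (String × String)) × (Option (List (String × String))))) (out : Option String) : Prop := out = pick_class_folder_alt tier rows_data
instance (tier : Int) (rows_data : List ((List (String × String)) × (Option (List (String × String))))) (out : Option String) : Decidable (Spec_pick_class_folder tier rows_data out) := by unfold Spec_pick_class_folder; infer_instance

-- ===== CLAIM (what is proved, stated in full; the proofs are below) =====
def Claim_equal_pick_class_folder : Prop := ∀ (tier : Int) (rows_data : List ((List (String × String)) × (Option (List (String × String))))), Dom_pick_class_folder tier rows_data → Pre_pick_class_folder tier rows_data → Spec_pick_class_folder tier rows_data (pick_class_folder tier rows_data)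

-- ===== LEMMAS AND PROOFS =====

-- the minimum priority index present in the set s
def pvMinSet (s : PySem.Set String) : Option Int :=
  if PySem.Set.contains s "PESU" then some 0
  else if PySem.Set.contains s "LACI" then some 1
  else if PySem.Set.contains s "LABO" then some 2
  else if PySem.Set.contains s "MYSP" then some 3
  else if PySem.Set.contains s "EPFU_LANO" then some 4
  else none

theorem pvPrio_get? (x : String) :
    pvPrio.get? x =
      if x == "PESU" then some 0
      else if x == "LACI" then some 1
      else if x == "LABO" then some 2
      else if x == "MYSP" then some 3
      else if x == "EPFU_LANO" then some 4
      else none := by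
  have h : pvPrio = PySem.Dict.mk [("PESU", 0), ("LACI", 1), ("LABO", 2), ("MYSP", 3), ("EPFU_LANO", 4)] := by decide
  rw [h]
  simp only [PySem.Dict.get?]
  split_ifs with h1 h2 h3 h4 h5
  all_goals try simp_all [List.find?]
  have e1 : (("PESU" : String) == x) = false := by
    have h' : x ≠ "PESU" := by simpa using h1
    rw [beq_eq_false_iff_ne]; intro hh; exact h' hh.symm
  have e2 : (("LACI" : String) == x) = false := by
    have h' : x ≠ "LACI" := by simpa using h2
    rw [beq_eq_false_iff_ne]; intro hh; exact h' hh.symm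
  have e3 : (("LABO" : String) == x) = false := by
    have h' : x ≠ "LABO" := by simpa using h3
    rw [beq_eq_false_iff_ne]; intro hh; exact h' hh.symm
  have e4 : (("MYSP" : String) == x) = false := by
    have h' : x ≠ "MYSP" := by simpa using h4
    rw [beq_eq_false_iff_ne]; intro hh; exact h' hh.symm
  have e5 : (("EPFU_LANO" : String) == x) = false := by
    have h' : x ≠ "EPFU_LANO" := by simpa using h5
    rw [beq_eq_false_iff_ne]; intro hh; exact h' hh.symm
  simp [e1, e2, e3, e4, e5]

theorem pv_contains_add (s : PySem.Set String) (x c : String) :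
    PySem.Set.contains (PySem.Set.add s x) c = (PySem.Set.contains s c || c == x) := by
  rw [Bool.eq_iff_iff]
  simp [PySem.Set.mem_add, or_comm]

theorem pvMinSet_add (s : PySem.Set String) (x : String) :
    pvMinSet (PySem.Set.add s x) =
      match pvPrio.get? x with
      | none => pvMinSet s
      | some i =>
        match pvMinSet s with
        | none => some i
        | some j => if i < j then some i else some j := by
  rw [pvPrio_get?]
  unfold pvMinSet
  simp only [pv_contains_add]
  by_cases h1 : x = "PESU" <;> by_cases h2 : x = "LACI" <;> by_cases h3 : x = "LABO" <;>
    by_cases h4 : x = "MYSP" <;> by_cases h5 : x = "EPFU_LANO" <;>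
    simp_all <;> split_ifs <;> simp_all

theorem pvScan_eq (s : PySem.Set String) :
    pvScan pvOrder s =
      (match pvMinSet s with
       | none => none
       | some i => PySem.List.pyGet? pvOrder i) := by
  unfold pvMinSet
  split_ifs with h1 h2 h3 h4 h5 <;>
    simp_all [pvScan, pvOrder, PySem.List.pyGet?, PySem.List.pyIdx?]

theorem pvFold_eq (rows : List ((List (String × String)) × (Option (List (String × String))))) :
    ∀ (s : PySem.Set String),
      pvMinSet (rows.foldl (fun s r =>
          match r.2 with
          | none => s
          | some pred => PySem.Set.add s (pvPredClass pred)) s) =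
      rows.foldl (fun b r =>
          match r.2 with
          | none => b
          | some pred =>
            match pvPrio.get? (pvPredClass pred) with
            | none => b
            | some i =>
              match b with
              | none => some i
              | some j => if i < j then some i else some j) (pvMinSet s) := by
  induction rows with
  | nil => intro s; rfl
  | cons r t ih =>
    intro s
    cases hr : r.2 with
    | none => simpa [hr] using ih s
    | some pred =>
      simp only [List.foldl_cons, hr]
      rw [ih (PySem.Set.add s (pvPredClass pred)), pvMinSet_add]

-- ===== VERDICT (by name: the statement is the Claim_ definition above) =====
theorem pick_class_folder_spec : Claim_equal_pick_class_folder := by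
  intro tier rows_data _ _
  unfold Spec_pick_class_folder pick_class_folder pick_class_folder_alt
  by_cases ht : tier ≠ 1
  · simp [ht]
  · simp only [ht, if_false]
    rw [pvScan_eq]
    have h := pvFold_eq rows_data PySem.Set.empty
    rw [show pvMinSet PySem.Set.empty = none from rfl] at h
    rw [h]
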